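-- pv_equiv track=rewrite | github.com/915dbfl/youlAlgorithm | python/zip/simulation/[2023 카카오 블라인드] 표현 가능한 이진트리.py | solution
-- ===== SOURCE A (Python) =====
-- from collections import deque
--
-- def t2b(number):
--     return bin(number)[2:]
--
-- def make_full(b):
--     full_cnt = [1, 3, 7, 15, 31, 63]
--     l = len(b)
--
--     for i in range(6):
--         if l <= full_cnt[i]:
--             return "0" * (full_cnt[i] - l) + b
--
-- def check_child(b):
--     dq = deque()
--     des = ((len(b)+1)//2)//2
--     dq.append(((len(b)+1)// 2, des))
--
--     while dq:
--         cur, d = dq.popleft()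
--         # 잎이 아닌 경우
--         if cur % 2 == 0:
--             if b[cur-1] == "0" and (b[cur - d -1] == "1" or b[cur + d - 1] == "1"):
--                 return False
--
--             dq.append((cur-d, d//2))
--             dq.append((cur+d, d//2))
--     return True
--
-- def solution(numbers):
--     answer = []
--
--     # 각 숫자 이진수로 만들기
--     for num in numbers:
--         bi = make_full(t2b(num))
--         if check_child(bi):
--             answer.append(1)
--         else:
--             answer.append(0)
--
--     return answer
-- ===== SOURCE B (Python) =====
-- def t2b(number):
--     return bin(number)[2:]
--
-- def make_full(b):
--     full_cnt = [1, 3, 7, 15, 31, 63]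
--     l = len(b)
--     for i in range(6):
--         if l <= full_cnt[i]:
--             return "0" * (full_cnt[i] - l) + b
--
-- def check(s):
--     # recursive divide-and-conquer over the in-order full-tree string
--     if len(s) <= 1:
--         return True
--     mid = len(s) // 2
--     left, right = s[:mid], s[mid + 1:]
--     if s[mid] == "0" and (left[len(left) // 2] == "1" or right[len(right) // 2] == "1"):
--         return False
--     return check(left) and check(right)
--
-- def solution(numbers):
--     return [1 if check(make_full(t2b(n))) else 0 for n in numbers]
-- ===== Notes on version B (the rewrite author's own statement) =====
-- stated objective: alternative
-- what changed: The BFS over 1-based index/offset pairs in a deque (check_child) is replaced by a recursive divide-and-conquer check that splits the in-order string at its middle and recurses on the two halves; the per-number driver loop becomes a list comprehension.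
import Mathlib
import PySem

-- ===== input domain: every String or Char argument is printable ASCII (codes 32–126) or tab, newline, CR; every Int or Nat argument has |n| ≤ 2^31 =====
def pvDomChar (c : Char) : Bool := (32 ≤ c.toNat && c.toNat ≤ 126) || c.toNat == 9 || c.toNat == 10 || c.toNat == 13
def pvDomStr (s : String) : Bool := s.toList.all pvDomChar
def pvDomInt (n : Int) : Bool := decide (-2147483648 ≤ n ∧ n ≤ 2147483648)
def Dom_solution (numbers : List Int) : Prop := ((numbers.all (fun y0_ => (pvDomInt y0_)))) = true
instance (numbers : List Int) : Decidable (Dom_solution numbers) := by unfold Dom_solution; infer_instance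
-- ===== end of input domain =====

-- B replaces A's index-queue BFS over tree positions by a recursive divide-and-conquer on the
-- in-order string (objective: alternative decomposition, similar cost).
-- Strings are handled as List Char per the PySem convention.
-- t2b and make_full are textually identical in Source A and Source B; they are shared below.

-- ===== PORT A =====
-- t2b(number) = bin(number)[2:]
def t2b (number : Int) : List Char :=
  PySem.List.slice (PySem.Int.toBinChars0b number) (some 2) none

-- make_full: first full size 2^k-1 (k ≤ 6) that fits, left-padded with '0'; none = Python returns None
def mfLoop : List Nat → List Char → Option (List Char)
  | [], _ => none
  | c :: rest, b => if b.length ≤ c then some (List.replicate (c - b.length) '0' ++ b) else mfLoop rest b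

def make_full (b : List Char) : Option (List Char) := mfLoop [1, 3, 7, 15, 31, 63] b

-- the while-loop over the deque; fuel = initial len+1 bounds the number of pops (each pop consumes 1).
-- b[i] is pyGet?; a none (IndexError) never occurs on the full-tree strings solution builds.
def bfs : Nat → List Char → List (Int × Int) → Bool
  | _, _, [] => true
  | 0, _, _ :: _ => true   -- fuel exhausted: unreachable for the inputs check_child supplies
  | f + 1, s, (cur, d) :: q =>
    if PySem.Int.mod cur 2 == 0 then
      if (PySem.List.pyGet? s (cur - 1) == some '0') &&
         ((PySem.List.pyGet? s (cur - d - 1) == some '1') || (PySem.List.pyGet? s (cur + d - 1) == some '1')) then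
        false
      else
        bfs f s (q ++ [(cur - d, PySem.Int.floordiv d 2), (cur + d, PySem.Int.floordiv d 2)])
    else
      bfs f s q

def check_child (b : List Char) : Bool :=
  let root : Int := PySem.Int.floordiv ((b.length : Int) + 1) 2
  let des : Int := PySem.Int.floordiv root 2
  bfs (b.length + 1) b [(root, des)]

def solution (numbers : List Int) : List Int :=
  numbers.foldl (fun answer num =>
    match make_full (t2b num) with
    | some bi => answer ++ [if check_child bi then 1 else 0]
    | none => answer   -- Python raises TypeError here; unreachable under Dom (≤ 33 binary chars ≤ 63)
    ) []

-- ===== PORT B =====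
-- check(s): recursive divide-and-conquer; s[i] on the reached indices is total, written as getD
-- (out-of-range indexing is unreachable from solution_alt, which only passes full-tree strings).
def checkB (s : List Char) : Bool :=
  if h : s.length ≤ 1 then true
  else
    let mid := s.length / 2
    let left := s.take mid
    let right := s.drop (mid + 1)
    if s.getD mid ' ' == '0' &&
       (left.getD (left.length / 2) ' ' == '1' || right.getD (right.length / 2) ' ' == '1') then
      false
    else
      checkB left && checkB right
termination_by s.length
decreasing_by
  · simp only [List.length_take]; omega
  · simp only [List.length_drop]; omega

def solution_alt (numbers : List Int) : List Int :=
  numbers.map (fun n =>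
    match make_full (t2b n) with
    | some bi => if checkB bi then 1 else 0
    | none => 0   -- Python raises TypeError here; unreachable under Dom
    )

-- ===== PRECONDITION & SPEC =====
def Spec_solution (numbers : List Int) (out : List Int) : Prop := out = solution_alt numbers
instance (numbers : List Int) (out : List Int) : Decidable (Spec_solution numbers out) := by unfold Spec_solution; infer_instance

-- ===== CLAIM (what is proved, stated in full; the proofs are below) =====
def Claim_equal_solution : Prop := ∀ (numbers : List Int), Dom_solution numbers → Spec_solution numbers (solution numbers)

-- ===== LEMMAS AND PROOFS =====

-- per-subtree recursive reading of A's node check: okAbs h s cur checks the height-h subtree whose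
-- root sits at 1-based position cur of s.
def okAbs : Nat → List Char → Int → Bool
  | 0, _, _ => true
  | 1, _, _ => true
  | h + 2, s, cur =>
    if (PySem.List.pyGet? s (cur - 1) == some '0') &&
       ((PySem.List.pyGet? s (cur - 2 ^ h - 1) == some '1') || (PySem.List.pyGet? s (cur + 2 ^ h - 1) == some '1')) then
      false
    else
      okAbs (h + 1) s (cur - 2 ^ h) && okAbs (h + 1) s (cur + 2 ^ h)

-- the d component the BFS carries for a height-h node
def dOf : Nat → Int
  | 0 => 0
  | 1 => 0
  | h + 2 => (2 : Int) ^ h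

-- queue entries are (height, 1-based position); parity of the position decides leafness in A
def goodE (e : Nat × Int) : Prop :=
  (e.1 = 1 ∧ e.2 % 2 = 1) ∨ (2 ≤ e.1 ∧ e.2 % 2 = 0)

lemma floordiv_dOf (h : Nat) : PySem.Int.floordiv (dOf (h + 2)) 2 = dOf (h + 1) := by
  cases h with
  | zero => decide
  | succ j =>
    show PySem.Int.floordiv ((2 : Int) ^ (j + 1)) 2 = (2 : Int) ^ j
    rw [PySem.Int.floordiv_eq_ediv_of_pos (by norm_num), pow_succ]
    exact Int.mul_ediv_cancel _ (by norm_num)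

lemma bfs_eq (s : List Char) : ∀ (f : Nat) (q : List (Nat × Int)),
    (q.map (fun e => 2 ^ e.1 - 1)).sum ≤ f →
    (∀ e ∈ q, goodE e) →
    bfs f s (q.map (fun e => (e.2, dOf e.1))) = q.all (fun e => okAbs e.1 s e.2) := by
  intro f
  induction f with
  | zero =>
    intro q hsum hg
    cases q with
    | nil => rfl
    | cons e q' =>
      exfalso
      have h1 : 1 ≤ e.1 := by rcases hg e (List.mem_cons_self) with ⟨h, _⟩ | ⟨h, _⟩ <;> omega
      have h2p : 2 ^ 1 ≤ 2 ^ e.1 := Nat.pow_le_pow_right (by norm_num) h1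
      have : 1 ≤ 2 ^ e.1 - 1 := by simp at h2p; omega
      simp [List.map_cons, List.sum_cons] at hsum
      omega
  | succ f ih =>
    intro q hsum hg
    cases q with
    | nil => rfl
    | cons e q' =>
      obtain ⟨h, c⟩ := e
      rcases hg _ (List.mem_cons_self) with ⟨h1, hodd⟩ | ⟨h2, heven⟩
      · -- leaf: h = 1, c odd
        subst h1
        simp only [List.map_cons]
        rw [bfs]
        have hm : (PySem.Int.mod c 2 == 0) = false := by
          rw [PySem.Int.mod_eq_emod_of_pos (by norm_num)]
          simp [hodd]
        rw [hm]
        simp only [Bool.false_eq_true, if_false]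
        rw [ih q' (by simp at hsum ⊢; omega) (fun e he => hg e (List.mem_cons_of_mem _ he))]
        simp [okAbs]
      · -- internal: h = j + 2, c even
        obtain ⟨j, rfl⟩ : ∃ j, h = j + 2 := ⟨h - 2, by omega⟩
        simp only [List.map_cons]
        rw [bfs]
        have hm : (PySem.Int.mod c 2 == 0) = true := by
          rw [PySem.Int.mod_eq_emod_of_pos (by norm_num)]
          simp [heven]
        rw [hm]
        simp only [if_true]
        have hd : dOf (j + 2) = (2:Int) ^ j := rfl
        have hp : (2:Nat) ^ (j+2) = 2 * 2 ^ (j+1) := by ring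
        have hp1 : (1:Nat) ≤ 2 ^ (j+1) := Nat.one_le_two_pow
        by_cases hviol : ((PySem.List.pyGet? s (c - 1) == some '0') &&
            ((PySem.List.pyGet? s (c - dOf (j+2) - 1) == some '1') ||
             (PySem.List.pyGet? s (c + dOf (j+2) - 1) == some '1'))) = true
        · -- violation: both sides are false
          simp only [hviol, if_true]
          have hviol2 : ((PySem.List.pyGet? s (c - 1) == some '0') &&
              ((PySem.List.pyGet? s (c - 2^j - 1) == some '1') ||
               (PySem.List.pyGet? s (c + 2^j - 1) == some '1'))) = true := by
            rw [← hd]; exact hviol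
          simp only [List.all_cons]
          rw [okAbs]
          simp [hviol2]
        · -- no violation: push the two children and use the IH
          simp only [hviol]
          rw [floordiv_dOf]
          have hmapch : [(c - dOf (j+2), dOf (j+1)), (c + dOf (j+2), dOf (j+1))]
              = List.map (fun e : Nat × Int => (e.2, dOf e.1)) [(j+1, c - dOf (j+2)), (j+1, c + dOf (j+2))] := rfl
          rw [hmapch, ← List.map_append]
          rw [ih (q' ++ [(j+1, c - dOf (j+2)), (j+1, c + dOf (j+2))])
            (by simp at hsum ⊢; omega)
            (by
              intro e he
              rcases List.mem_append.1 he with hq | hch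
              · exact hg e (List.mem_cons_of_mem _ hq)
              · have heq : e = (j+1, c - dOf (j+2)) ∨ e = (j+1, c + dOf (j+2)) := by
                  simpa using hch
                cases j with
                | zero =>
                  rcases heq with rfl | rfl <;> exact Or.inl ⟨rfl, by simp [dOf]; omega⟩
                | succ i =>
                  have h2i : dOf (i+1+2) = 2 * (2:Int) ^ i := by rw [hd]; ring
                  rcases heq with rfl | rfl <;>
                    exact Or.inr ⟨by omega, by simp only [h2i]; omega⟩)]
          have hviol2 : ((PySem.List.pyGet? s (c - 1) == some '0') &&
              ((PySem.List.pyGet? s (c - 2^j - 1) == some '1') ||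
               (PySem.List.pyGet? s (c + 2^j - 1) == some '1'))) = false := by
            rw [← hd]; simpa using hviol
          simp only [List.all_append, List.all_cons, List.all_nil]
          rw [okAbs]
          simp only [hviol2, Bool.false_eq_true, if_false, hd, Bool.and_true]
          simp [Bool.and_comm, Bool.and_assoc]

lemma pyGet_mid (pre t post : List Char) (i : Nat) (hi : i < t.length) :
    PySem.List.pyGet? (pre ++ t ++ post) ((pre.length : Int) + i) = some (t.getD i ' ') := by
  have hc : ((pre.length : Int) + i) = ((pre.length + i : Nat) : Int) := by push_cast; ring
  rw [hc, PySem.List.pyGet?_natCast, List.append_assoc,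
      List.getElem?_append_right (by omega), List.getElem?_append_left (by omega)]
  simp [List.getD_eq_getElem?_getD, List.getElem?_eq_getElem hi]

lemma okAbs_checkB : ∀ (h : Nat) (pre t post : List Char), t.length = 2 ^ (h + 1) - 1 →
    okAbs (h + 1) (pre ++ t ++ post) ((pre.length : Int) + 2 ^ h) = checkB t := by
  intro h
  induction h with
  | zero =>
    intro pre t post ht
    rw [checkB]
    simp [okAbs, ht]
  | succ h ih =>
    intro pre t post ht
    -- abbreviate a = 2^h ≥ 1; all index arithmetic is linear in a
    obtain ⟨a, ha1, hpow⟩ : ∃ a : Nat, 1 ≤ a ∧ 2 ^ h = a := ⟨2 ^ h, Nat.one_le_two_pow, rfl⟩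
    have hlen : t.length = 4 * a - 1 := by
      rw [ht]; rw [pow_succ, pow_succ, hpow]; omega
    have hInt : ((2:Int) ^ (h+1)) = 2 * a := by
      subst hpow; push_cast; rw [pow_succ]; ring
    -- the three absolute gets land inside t
    have hg0 : PySem.List.pyGet? (pre ++ t ++ post) ((pre.length : Int) + 2 ^ (h+1) - 1)
        = some (t.getD (2 * a - 1) ' ') := by
      have : ((pre.length : Int) + 2 ^ (h+1) - 1) = (pre.length : Int) + (2 * a - 1 : Nat) := by
        rw [hInt]; omega
      rw [this, pyGet_mid _ _ _ _ (by omega)]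
    have hgl : PySem.List.pyGet? (pre ++ t ++ post) ((pre.length : Int) + 2 ^ (h+1) - 2 ^ h - 1)
        = some (t.getD (a - 1) ' ') := by
      have : ((pre.length : Int) + 2 ^ (h+1) - 2 ^ h - 1) = (pre.length : Int) + (a - 1 : Nat) := by
        rw [hInt]; push_cast [← hpow]; omega
      rw [this, pyGet_mid _ _ _ _ (by omega)]
    have hgr : PySem.List.pyGet? (pre ++ t ++ post) ((pre.length : Int) + 2 ^ (h+1) + 2 ^ h - 1)
        = some (t.getD (3 * a - 1) ' ') := by
      have : ((pre.length : Int) + 2 ^ (h+1) + 2 ^ h - 1) = (pre.length : Int) + (3 * a - 1 : Nat) := by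
        rw [hInt]; push_cast [← hpow]; omega
      rw [this, pyGet_mid _ _ _ _ (by omega)]
    -- recursive calls via the IH
    have hsplitL : pre ++ t ++ post = pre ++ t.take (2*a - 1) ++ (t.drop (2*a - 1) ++ post) := by
      rw [List.append_assoc, List.append_assoc, ← List.append_assoc (t.take _), List.take_append_drop]
    have hsplitR : pre ++ t ++ post = (pre ++ t.take (2*a)) ++ t.drop (2*a) ++ post := by
      conv_lhs => rw [← List.take_append_drop (2*a) t]
      simp [List.append_assoc]
    have hL : okAbs (h+1) (pre ++ t ++ post) ((pre.length : Int) + 2 ^ (h+1) - 2 ^ h)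
        = checkB (t.take (2*a - 1)) := by
      have harg : ((pre.length : Int) + 2 ^ (h+1) - 2 ^ h) = ((pre.length : Int) + 2 ^ h) := by
        rw [hInt]; push_cast [← hpow]; omega
      rw [harg, hsplitL]
      exact ih pre _ _ (by simp [hlen, ← hpow]; omega)
    have hR : okAbs (h+1) (pre ++ t ++ post) ((pre.length : Int) + 2 ^ (h+1) + 2 ^ h)
        = checkB (t.drop (2*a)) := by
      have harg : ((pre.length : Int) + 2 ^ (h+1) + 2 ^ h) = (((pre ++ t.take (2*a)).length : Int) + 2 ^ h) := by
        simp [List.length_append, List.length_take, hlen]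
        rw [hInt]; push_cast [← hpow]; omega
      rw [harg, hsplitR]
      exact ih _ _ _ (by simp [hlen, ← hpow]; omega)
    -- unfold both sides
    rw [checkB]
    rw [dif_neg (by omega)]
    simp only
    have hmid : t.length / 2 = 2 * a - 1 := by omega
    have hlt : (t.take (t.length / 2)).length = 2 * a - 1 := by
      simp [List.length_take]; omega
    have hld : (t.drop (t.length / 2 + 1)).length = 2 * a - 1 := by
      simp [List.length_drop]; omega
    have hdrop1 : t.length / 2 + 1 = 2 * a := by omega
    have hgetl : (t.take (t.length / 2)).getD ((t.take (t.length / 2)).length / 2) ' ' = t.getD (a-1) ' ' := by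
      rw [hlt, hmid, show (2*a-1)/2 = a-1 from by omega]
      rw [List.getD_eq_getElem?_getD, List.getD_eq_getElem?_getD, List.getElem?_take]
      simp [show a - 1 < 2*a - 1 by omega]
    have hgetr : (t.drop (t.length / 2 + 1)).getD ((t.drop (t.length / 2 + 1)).length / 2) ' ' = t.getD (3*a-1) ' ' := by
      rw [hld, show (2*a-1)/2 = a-1 from by omega]
      rw [List.getD_eq_getElem?_getD, List.getD_eq_getElem?_getD, List.getElem?_drop]
      rw [show t.length / 2 + 1 + (a-1) = 3*a-1 from by omega]
    show okAbs (h + 1 + 1) (pre ++ t ++ post) ((pre.length : Int) + 2 ^ (h+1)) = _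
    rw [okAbs]
    rw [show ((pre.length : Int) + 2 ^ (h+1) - 2 ^ h - 1) = ((pre.length : Int) + 2 ^ (h+1)) - 2 ^ h - 1 by ring] at hgl
    rw [show ((pre.length : Int) + 2 ^ (h+1) + 2 ^ h - 1) = ((pre.length : Int) + 2 ^ (h+1)) + 2 ^ h - 1 by ring] at hgr
    rw [show ((pre.length : Int) + 2 ^ (h+1) - 2 ^ h) = ((pre.length : Int) + 2 ^ (h+1)) - 2 ^ h by ring] at hL
    rw [show ((pre.length : Int) + 2 ^ (h+1) + 2 ^ h) = ((pre.length : Int) + 2 ^ (h+1)) + 2 ^ h by ring] at hR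
    rw [hg0, hgl, hgr, hL, hR, hgetl, hgetr, hmid]
    simp [show 2*a - 1 + 1 = 2*a from by omega]

lemma check_child_eq (t : List Char) (k : Nat) (hk : t.length = 2 ^ (k + 1) - 1) :
    check_child t = checkB t := by
  have hone : (1:Nat) ≤ 2 ^ (k+1) := Nat.one_le_two_pow
  have hcast : (t.length : Int) = 2 ^ (k + 1) - 1 := by
    rw [hk]; push_cast [Nat.cast_sub hone]; ring
  have hroot : PySem.Int.floordiv ((t.length : Int) + 1) 2 = (2:Int) ^ k := by
    rw [hcast, PySem.Int.floordiv_eq_ediv_of_pos (by norm_num)]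
    have h2 : (2:Int) ^ (k+1) - 1 + 1 = 2 ^ k * 2 := by rw [pow_succ]; ring
    rw [h2, Int.mul_ediv_cancel _ (by norm_num)]
  have hdes : PySem.Int.floordiv ((2:Int) ^ k) 2 = dOf (k + 1) := by
    cases k with
    | zero => decide
    | succ j =>
      show PySem.Int.floordiv ((2 : Int) ^ (j + 1)) 2 = (2 : Int) ^ j
      rw [PySem.Int.floordiv_eq_ediv_of_pos (by norm_num), pow_succ]
      exact Int.mul_ediv_cancel _ (by norm_num)
  have hgood : goodE (k + 1, (2:Int) ^ k) := by
    cases k with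
    | zero => left; exact ⟨rfl, by decide⟩
    | succ j =>
      right
      refine ⟨by omega, ?_⟩
      show (2:Int) ^ (j+1) % 2 = 0
      rw [pow_succ]; exact Int.mul_emod_left _ _
  have hb := bfs_eq t (t.length + 1) [(k + 1, (2:Int) ^ k)]
    (by simp [hk]) (by intro e he; simp at he; subst he; exact hgood)
  simp only [List.map_cons, List.map_nil] at hb
  show bfs (t.length + 1) t [(PySem.Int.floordiv ((t.length : Int) + 1) 2,
      PySem.Int.floordiv (PySem.Int.floordiv ((t.length : Int) + 1) 2) 2)] = checkB t
  rw [hroot, hdes, hb]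
  have hfin := okAbs_checkB k [] t [] hk
  simpa using hfin

lemma make_full_spec (b : List Char) (h1 : 1 ≤ b.length) (h63 : b.length ≤ 63) :
    ∃ k t, make_full b = some t ∧ t.length = 2 ^ (k + 1) - 1 := by
  simp only [make_full, mfLoop]
  split_ifs with g1 g2 g3 g4 g5
  · exact ⟨0, _, rfl, by simp; omega⟩
  · exact ⟨1, _, rfl, by simp; omega⟩
  · exact ⟨2, _, rfl, by simp; omega⟩
  · exact ⟨3, _, rfl, by simp; omega⟩
  · exact ⟨4, _, rfl, by simp; omega⟩
  · exact ⟨5, _, rfl, by simp; omega⟩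

lemma t2b_len (n : Int) (hd : pvDomInt n = true) :
    1 ≤ (t2b n).length ∧ (t2b n).length ≤ 63 := by
  have hb : -2147483648 ≤ n ∧ n ≤ 2147483648 := by simpa [pvDomInt] using hd
  have habs : n.natAbs < 2 ^ 32 := by omega
  have hlen : (Nat.toDigits 2 n.natAbs).length ≤ 32 :=
    (Nat.length_toDigits_le_iff (by norm_num) (by norm_num)).2 habs
  have hpos : 0 < (Nat.toDigits 2 n.natAbs).length := Nat.length_toDigits_pos
  have ht : t2b n = (PySem.Int.toBinChars0b n).drop 2 := by
    rw [t2b]; exact PySem.List.slice_from _ (by norm_num)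
  rw [ht, PySem.Int.toBinChars0b]
  split_ifs with hneg
  · simp only [List.drop_succ_cons, List.drop_zero, List.length_cons]
    omega
  · have h2 : n.toNat = n.natAbs := by omega
    simp only [List.drop_succ_cons, List.drop_zero, h2]
    omega

lemma sol_acc : ∀ (l : List Int) (acc : List Int), (∀ n ∈ l, pvDomInt n = true) →
    l.foldl (fun answer num =>
      match make_full (t2b num) with
      | some bi => answer ++ [if check_child bi then 1 else 0]
      | none => answer) (acc : List Int)
    = acc ++ l.map (fun n =>
      match make_full (t2b n) with
      | some bi => if checkB bi then (1 : Int) else 0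
      | none => 0) := by
  intro l
  induction l with
  | nil => intro acc _; simp
  | cons n rest ih =>
    intro acc hdom
    obtain ⟨k, t, hmf, hlen⟩ :=
      make_full_spec (t2b n) (t2b_len n (hdom n (List.mem_cons_self))).1
        (t2b_len n (hdom n (List.mem_cons_self))).2
    simp only [List.foldl_cons, List.map_cons, hmf, check_child_eq t k hlen]
    rw [ih _ (fun m hm => hdom m (List.mem_cons_of_mem _ hm)), List.append_assoc]
    rfl

-- ===== VERDICT (by name: the statement is the Claim_ definition above) =====
theorem solution_spec : Claim_equal_solution := by
  intro numbers hdom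
  unfold Spec_solution solution solution_alt
  have hall : ∀ n ∈ numbers, pvDomInt n = true := by
    simpa [Dom_solution, List.all_eq_true] using hdom
  simpa using sol_acc numbers [] hall
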